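-- pv_equiv track=rewrite | github.com/doguskysilva/algoritmando | notacao_polonesa_inversa.py | organiza_expressao
-- ===== SOURCE A (Python) =====
-- def organiza_expressao(expressao: str) -> str:
--     expressao = expressao.replace(" ", "")
--     expressao_organizada = ''
--     for index, caractere in enumerate(expressao):
--         if index == 0 and (caractere.isnumeric() or caractere.isalpha()):
--             expressao_organizada += caractere
--         elif not caractere.isnumeric() and not caractere.isalpha():
--             if index == 0:
--                 expressao_organizada += caractere + " "
--             elif expressao[index - 1].isnumeric() or expressao[index - 1].isalpha():
--                 expressao_organizada += " " + caractere + " "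
--             else:
--                 expressao_organizada += caractere + " "
--         else:
--             expressao_organizada += caractere
--     return expressao_organizada.lstrip().rstrip()
-- ===== SOURCE B (Python) =====
-- def organiza_expressao(expressao: str) -> str:
--     expressao = expressao.replace(" ", "")
--     tokens = []
--     buffer = ''
--     for caractere in expressao:
--         if caractere.isnumeric() or caractere.isalpha():
--             buffer += caractere
--         else:
--             if buffer:
--                 tokens.append(buffer)
--                 buffer = ''
--             tokens.append(caractere)
--     if buffer:
--         tokens.append(buffer)
--     return ' '.join(tokens)
-- ===== Notes on version B (the rewrite author's own statement) =====
-- stated objective: simpler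
-- what changed: Replaces A's index-based case analysis (enumerate with an expressao[index-1] lookup and hand-placed spaces plus a final lstrip/rstrip) by a single buffer-and-token pass: operand characters accumulate in a buffer, every other character flushes it and becomes its own token, and the token list is joined with single spaces.
-- intended difference: On inputs whose space-stripped form begins or ends with a tab/newline/CR, A's final blanket lstrip/rstrip silently deletes those boundary one-character tokens (on a lone tab A returns the empty string), while B keeps every token (B returns the tab itself); B's value is the intended one for a function whose job is spacing tokens, not dropping them. — e.g. on organiza_expressao("\t"): A returns "", B returns "\t"
import Mathlib
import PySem

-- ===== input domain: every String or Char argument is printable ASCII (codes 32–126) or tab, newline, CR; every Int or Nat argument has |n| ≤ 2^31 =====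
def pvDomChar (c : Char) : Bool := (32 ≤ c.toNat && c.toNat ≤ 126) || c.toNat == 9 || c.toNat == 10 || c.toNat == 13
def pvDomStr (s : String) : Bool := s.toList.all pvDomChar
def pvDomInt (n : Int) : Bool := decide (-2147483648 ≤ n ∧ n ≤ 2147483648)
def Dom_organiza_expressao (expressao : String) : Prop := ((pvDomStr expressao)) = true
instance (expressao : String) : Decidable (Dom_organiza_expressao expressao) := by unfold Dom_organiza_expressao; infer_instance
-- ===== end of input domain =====

-- B tokenizes in one pass (operand buffer + token list joined by ' ') instead of A's
-- index/previous-char case analysis; on inputs whose space-stripped form starts or ends with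
-- tab/newline/CR the two differ (see D_ below).

-- ===== PORT A =====
-- loop body of A's for-loop (index == 0 test, previous-character lookup expressao[index-1])
def pvStepA (s : List Char) (acc : List Char) (p : Int × Char) : List Char :=
  if p.1 == 0 && (PySem.Chars.isdigit p.2 || PySem.Chars.isalpha p.2) then acc ++ [p.2]
  else if !(PySem.Chars.isdigit p.2) && !(PySem.Chars.isalpha p.2) then
    if p.1 == 0 then acc ++ [p.2, ' ']
    else if PySem.Chars.isdigit (PySem.List.pyGetD s (p.1 - 1) ' ')
           || PySem.Chars.isalpha (PySem.List.pyGetD s (p.1 - 1) ' ') then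
      acc ++ [' ', p.2, ' ']
    else acc ++ [p.2, ' ']
  else acc ++ [p.2]

def organiza_expressao (expressao : String) : String :=
  let s := PySem.Chars.replace expressao.toList [' '] []
  let org := (PySem.List.enumerate s).foldl (pvStepA s) []
  String.ofList (PySem.Chars.rstrip (PySem.Chars.lstrip org))

-- ===== PORT B =====
-- loop body of B's for-loop (grow the operand buffer / flush it and emit the operator token)
def pvStepB (st : List (List Char) × List Char) (c : Char) : List (List Char) × List Char :=
  if PySem.Chars.isdigit c || PySem.Chars.isalpha c then (st.1, st.2 ++ [c])
  else ((if st.2 = [] then st.1 else st.1 ++ [st.2]) ++ [[c]], [])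

def organiza_expressao_alt (expressao : String) : String :=
  let s := PySem.Chars.replace expressao.toList [' '] []
  let st := s.foldl pvStepB ([], [])
  String.ofList (PySem.Chars.join [' '] (if st.2 = [] then st.1 else st.1 ++ [st.2]))

-- ===== PRECONDITION & SPEC =====
-- On inputs whose space-stripped form begins or ends with a tab/newline/CR, A's final blanket
-- lstrip/rstrip silently deletes those boundary one-character tokens (A "\t" = ""), while B keeps
-- every token (B "\t" = "\t"); B's value is the intended one for a token-spacing function.
def D_organiza_expressao (expressao : String) : Prop :=
  let s := expressao.toList.filter (· ≠ ' ')
  s ≠ [] ∧ (PySem.Chars.isspace (s.headD ' ') = true ∨ PySem.Chars.isspace (s.getLastD ' ') = true)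
instance (expressao : String) : Decidable (D_organiza_expressao expressao) := by
  unfold D_organiza_expressao; infer_instance

def Spec_organiza_expressao (expressao : String) (out : String) : Prop :=
  ¬ D_organiza_expressao expressao → out = organiza_expressao_alt expressao
instance (expressao : String) (out : String) : Decidable (Spec_organiza_expressao expressao out) := by
  unfold Spec_organiza_expressao; infer_instance

def pvDiffWitness_organiza_expressao : String := "\t"
def pvDiffWitnessOut_organiza_expressao : String × String := ("", "\t")

-- ===== CLAIM (what is proved, stated in full; the proofs are below) =====
def Claim_unchanged_organiza_expressao : Prop := ∀ (expressao : String), Dom_organiza_expressao expressao → Spec_organiza_expressao expressao (organiza_expressao expressao)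
def Claim_changed_organiza_expressao : Prop := Dom_organiza_expressao (pvDiffWitness_organiza_expressao) ∧ D_organiza_expressao (pvDiffWitness_organiza_expressao) ∧ organiza_expressao (pvDiffWitness_organiza_expressao) = pvDiffWitnessOut_organiza_expressao.1 ∧ organiza_expressao_alt (pvDiffWitness_organiza_expressao) = pvDiffWitnessOut_organiza_expressao.2 ∧ pvDiffWitnessOut_organiza_expressao.1 ≠ pvDiffWitnessOut_organiza_expressao.2
def Claim_exact_organiza_expressao : Prop := ∀ (expressao : String), Dom_organiza_expressao expressao → D_organiza_expressao expressao → organiza_expressao expressao ≠ organiza_expressao_alt expressao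

-- ===== LEMMAS AND PROOFS =====

-- A's ''.replace(' ', '') is a filter
theorem pvRepl_go (fuel : Nat) : ∀ (l acc : List Char), l.length ≤ fuel →
    PySem.Chars.replace.go [' '] [] fuel l acc = acc.reverse ++ l.filter (· ≠ ' ') := by
  induction fuel with
  | zero => intro l acc h
            have : l = [] := List.length_eq_zero_iff.mp (Nat.le_zero.mp h)
            subst this; simp [PySem.Chars.replace.go]
  | succ n ih =>
      intro l acc h
      cases l with
      | nil => simp [PySem.Chars.replace.go]
      | cons c t =>
          by_cases hc : c = ' '
          · subst hc
            rw [show PySem.Chars.replace.go [' '] [] (n+1) (' ' :: t) acc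
                  = PySem.Chars.replace.go [' '] [] n t acc from by
                simp [PySem.Chars.replace.go, List.isPrefixOf]]
            rw [ih t acc (by simpa using h)]
            simp
          · rw [show PySem.Chars.replace.go [' '] [] (n+1) (c :: t) acc
                  = PySem.Chars.replace.go [' '] [] n t (c :: acc) from by
                simp [PySem.Chars.replace.go, List.isPrefixOf, Ne.symm hc]]
            rw [ih t (c :: acc) (by simpa using h)]
            simp [hc]

theorem pvRepl (l : List Char) :
    PySem.Chars.replace l [' '] [] = l.filter (· ≠ ' ') := by
  rw [PySem.Chars.replace]
  simp [pvRepl_go l.length l [] le_rfl]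

-- the character class both programs branch on ("isnumeric or isalpha")
def pvAl (c : Char) : Bool := PySem.Chars.isdigit c || PySem.Chars.isalpha c

-- per-character emission of A's loop, with the previous character carried explicitly
def pvEmitA : Option Char → List Char → List Char
  | _, [] => []
  | none, c :: r => (if pvAl c then [c] else [c, ' ']) ++ pvEmitA (some c) r
  | some p, c :: r =>
      (if pvAl c then [c] else if pvAl p then [' ', c, ' '] else [c, ' ']) ++ pvEmitA (some c) r

theorem pvEmitA_none_cons (c : Char) (r : List Char) :
    pvEmitA none (c :: r) = (if pvAl c then [c] else [c, ' ']) ++ pvEmitA (some c) r := rfl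
theorem pvEmitA_some_cons (p c : Char) (r : List Char) :
    pvEmitA (some p) (c :: r)
      = (if pvAl c then [c] else if pvAl p then [' ', c, ' '] else [c, ' ']) ++ pvEmitA (some c) r := rfl

-- B's tokenization as a recursion over the remaining characters
def pvTok : List Char → List Char → List (List Char)
  | buf, [] => if buf = [] then [] else [buf]
  | buf, c :: r =>
      if pvAl c then pvTok (buf ++ [c]) r
      else (if buf = [] then [] else [buf]) ++ [c] :: pvTok [] r

theorem pvTok_cons (buf : List Char) (c : Char) (r : List Char) :
    pvTok buf (c :: r) = if pvAl c then pvTok (buf ++ [c]) r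
      else (if buf = [] then [] else [buf]) ++ [c] :: pvTok [] r := rfl

-- the extra trailing blank A emits after a final operator (removed again by its rstrip)
def pvTrail (s : List Char) : List Char :=
  match s.getLast? with
  | none => []
  | some c => if pvAl c then [] else [' ']

theorem pvTrail_cons (c : Char) (r : List Char) (h : pvAl c = true ∨ r ≠ []) :
    pvTrail (c :: r) = pvTrail r := by
  cases r with
  | nil => rcases h with h | h
           · simp [pvTrail, h]
           · simp at h
  | cons b l => simp [pvTrail]

theorem pvTok_ne_nil : ∀ (suf buf : List Char), buf ≠ [] ∨ suf ≠ [] → pvTok buf suf ≠ [] := by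
  intro suf
  induction suf with
  | nil => intro buf h
           rcases h with h | h
           · simp [pvTok, h]
           · simp at h
  | cons c r ih =>
      intro buf _
      by_cases hc : pvAl c
      · rw [pvTok_cons, if_pos hc]; exact ih (buf ++ [c]) (Or.inl (by simp))
      · rw [pvTok_cons, if_neg hc]
        intro hcontra
        rcases List.append_eq_nil_iff.mp hcontra with ⟨_, h2⟩
        simp at h2

-- the heart of the equivalence: A's emission is B's space-joined token list plus pvTrail
theorem pvL : ∀ suf : List Char,
    (∀ p : Option Char, (∀ q, p = some q → pvAl q = false) →
       pvEmitA p suf = PySem.Chars.join [' '] (pvTok [] suf) ++ pvTrail suf)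
    ∧ (∀ (q : Char) (buf : List Char), pvAl q = true → buf ≠ [] →
       buf ++ pvEmitA (some q) suf = PySem.Chars.join [' '] (pvTok buf suf) ++ pvTrail suf) := by
  intro suf
  induction suf with
  | nil =>
      constructor
      · intro p _
        cases p <;> simp [pvEmitA, pvTok, pvTrail, PySem.Chars.join, List.intercalate]
      · intro q buf _ hbuf
        simp [pvEmitA, pvTok, pvTrail, hbuf, PySem.Chars.join_singleton]
  | cons c r ih =>
      constructor
      · intro p hp
        by_cases hc : pvAl c
        · have h2 := ih.2 c [c] hc (by simp)
          rw [pvTok_cons, if_pos hc, pvTrail_cons c r (Or.inl hc)]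
          cases p with
          | none => rw [pvEmitA_none_cons, if_pos hc]; simpa using h2
          | some q =>
              rw [pvEmitA_some_cons, if_pos hc]; simpa using h2
        · have h1 := ih.1 (some c) (by intro q hq; cases hq; exact eq_false_of_ne_true hc)
          have hstep : pvEmitA p (c :: r) = [c, ' '] ++ pvEmitA (some c) r := by
            cases p with
            | none => rw [pvEmitA_none_cons, if_neg hc]
            | some q => rw [pvEmitA_some_cons, if_neg hc, if_neg (by simp [hp q rfl])]
          rw [hstep, pvTok_cons, if_neg hc, if_pos rfl]
          cases r with
          | nil =>
              simp [pvEmitA, pvTok, pvTrail, hc, PySem.Chars.join_singleton]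
          | cons b l =>
              obtain ⟨t, ts, heq⟩ : ∃ t ts, pvTok [] (b :: l) = t :: ts := by
                rcases hx : pvTok [] (b :: l) with _ | ⟨t, ts⟩
                · exact absurd hx (pvTok_ne_nil (b :: l) [] (Or.inr (by simp)))
                · exact ⟨t, ts, rfl⟩
              rw [h1, pvTrail_cons c (b :: l) (Or.inr (by simp)), heq,
                List.nil_append, PySem.Chars.join_cons_cons]
              simp
      · intro q buf hqal hbuf
        by_cases hc : pvAl c
        · have h2 := ih.2 c (buf ++ [c]) hc (by simp)
          rw [pvEmitA_some_cons, if_pos hc, pvTok_cons, if_pos hc,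
            pvTrail_cons c r (Or.inl hc), ← h2]
          simp
        · have h1 := ih.1 (some c) (by intro q' hq'; cases hq'; exact eq_false_of_ne_true hc)
          rw [pvEmitA_some_cons, if_neg hc, if_pos hqal, pvTok_cons, if_neg hc, if_neg hbuf]
          cases r with
          | nil =>
              simp [pvEmitA, pvTok, pvTrail, hc, PySem.Chars.join_cons_cons,
                PySem.Chars.join_singleton]
          | cons b l =>
              obtain ⟨t, ts, heq⟩ : ∃ t ts, pvTok [] (b :: l) = t :: ts := by
                rcases hx : pvTok [] (b :: l) with _ | ⟨t, ts⟩
                · exact absurd hx (pvTok_ne_nil (b :: l) [] (Or.inr (by simp)))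
                · exact ⟨t, ts, rfl⟩
              rw [h1, pvTrail_cons c (b :: l) (Or.inr (by simp)), heq,
                List.singleton_append, PySem.Chars.join_cons_cons, PySem.Chars.join_cons_cons]
              simp

-- expressao[index-1] is the previous character
theorem pvGetPrev (pre suf : List Char) (h : pre ≠ []) :
    PySem.List.pyGetD (pre ++ suf) ((pre.length : Int) - 1) ' ' = pre.getLast h := by
  have h1 : 1 ≤ pre.length := List.length_pos_iff.mpr h
  have : ((pre.length : Int) - 1) = ((pre.length - 1 : Nat) : Int) := by omega
  rw [this, PySem.List.pyGetD_natCast]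
  rw [List.getD_eq_getElem?_getD, List.getElem?_append_left (by omega)]
  rw [List.getLast_eq_getElem]
  simp [List.getElem?_eq_getElem (by omega : pre.length - 1 < pre.length)]

-- A's enumerate-fold equals the previous-character recursion
theorem pvA1 : ∀ (suf pre acc : List Char),
    (PySem.List.enumerate suf (pre.length : Int)).foldl (pvStepA (pre ++ suf)) acc
      = acc ++ pvEmitA pre.getLast? suf := by
  intro suf
  induction suf with
  | nil => intro pre acc; simp [PySem.List.enumerate, pvEmitA]
  | cons c r ih =>
      intro pre acc
      rw [PySem.List.enumerate_cons, List.foldl_cons]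
      cases pre with
      | nil =>
          have hstep : pvStepA ([] ++ c :: r) acc (((([] : List Char).length : Int)), c)
              = acc ++ (if pvAl c then [c] else [c, ' ']) := by
            by_cases hc : pvAl c
            · simp [pvStepA, pvAl] at hc ⊢
              rcases hc with hc | hc <;> simp [hc]
            · simp [pvAl] at hc
              simp [pvStepA, hc, pvAl]
          rw [hstep]
          have harg : ([] : List Char) ++ c :: r = [c] ++ r := by simp
          have hlen : (((([] : List Char).length : Int)) + 1) = (([c].length : Int)) := by simp
          rw [harg, hlen, ih [c] (acc ++ (if pvAl c then [c] else [c, ' ']))]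
          simp [pvEmitA]
      | cons d pre' =>
          set pre := d :: pre' with hpre
          have hne : pre ≠ [] := by simp [hpre]
          have hlen0 : ¬ ((pre.length : Int) == 0) = true := by
            simp [hpre]; omega
          have hget := pvGetPrev pre (c :: r) hne
          have hstep : pvStepA (pre ++ c :: r) acc ((pre.length : Int), c)
              = acc ++ (if pvAl c then [c]
                  else if pvAl (pre.getLast hne) then [' ', c, ' '] else [c, ' ']) := by
            by_cases hc : pvAl c
            · simp [pvAl] at hc
              rcases hc with hc | hc <;> simp [pvStepA, hc, hlen0, pvAl]
            · simp [pvAl] at hc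
              by_cases hp : pvAl (pre.getLast hne)
              · simp [pvAl] at hp
                simp [pvStepA, hc, hlen0, hget, hp, pvAl]
              · simp [pvAl] at hp
                simp [pvStepA, hc, hlen0, hget, hp, pvAl]
          rw [hstep]
          have harg : pre ++ c :: r = (pre ++ [c]) ++ r := by simp
          have hlen : ((pre.length : Int) + 1) = (((pre ++ [c]).length : Int)) := by
            simp only [List.length_append, List.length_singleton]; push_cast; omega
          rw [harg, hlen, ih (pre ++ [c])]
          have hl2 : (pre ++ [c]).getLast? = some c := by simp
          rw [hl2]
          have hl3 : pre.getLast? = some (pre.getLast hne) := List.getLast?_eq_some_getLast hne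
          rw [hl3]
          simp [pvEmitA]

-- B's fold equals the buffer recursion
theorem pvB1 : ∀ (suf : List Char) (toks : List (List Char)) (buf : List Char),
    (if (suf.foldl pvStepB (toks, buf)).2 = [] then (suf.foldl pvStepB (toks, buf)).1
     else (suf.foldl pvStepB (toks, buf)).1 ++ [(suf.foldl pvStepB (toks, buf)).2])
      = toks ++ pvTok buf suf := by
  intro suf
  induction suf with
  | nil =>
      intro toks buf
      by_cases h : buf = [] <;> simp [pvTok, h]
  | cons c r ih =>
      intro toks buf
      have hstep : pvStepB (toks, buf) c
          = if pvAl c then (toks, buf ++ [c])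
            else ((if buf = [] then toks else toks ++ [buf]) ++ [[c]], []) := rfl
      by_cases hc : pvAl c
      · simp only [List.foldl_cons, hstep, if_pos hc, pvTok_cons]
        exact ih toks (buf ++ [c])
      · simp only [List.foldl_cons, hstep, if_neg hc, pvTok_cons]
        rw [ih ((if buf = [] then toks else toks ++ [buf]) ++ [[c]]) []]
        by_cases hb : buf = [] <;> simp [hb]

theorem pvTok_head : ∀ (suf buf : List Char), buf ≠ [] →
    ∃ ext ts, pvTok buf suf = (buf ++ ext) :: ts := by
  intro suf
  induction suf with
  | nil => intro buf hb; exact ⟨[], [], by simp [pvTok, hb]⟩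
  | cons c r ih =>
      intro buf hb
      by_cases hc : pvAl c
      · obtain ⟨ext, ts, h⟩ := ih (buf ++ [c]) (by simp)
        exact ⟨[c] ++ ext, ts, by rw [pvTok_cons, if_pos hc, h]; simp⟩
      · exact ⟨[], [c] :: pvTok [] r, by rw [pvTok_cons, if_neg hc, if_neg hb]; simp⟩

-- the joined token list starts with the first character of the input
theorem pv_headJoin (c : Char) (r : List Char) :
    ∃ tail, PySem.Chars.join [' '] (pvTok [] (c :: r)) = c :: tail := by
  by_cases hc : pvAl c
  · obtain ⟨ext, ts, h⟩ := pvTok_head r [c] (by simp)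
    rw [pvTok_cons, if_pos hc, List.nil_append, h]
    cases ts with
    | nil => exact ⟨ext, by rw [PySem.Chars.join_singleton]; simp⟩
    | cons t ts' =>
        exact ⟨ext ++ ' ' :: PySem.Chars.join [' '] (t :: ts'),
          by rw [PySem.Chars.join_cons_cons]; simp⟩
  · rw [pvTok_cons, if_neg hc, if_pos rfl, List.nil_append]
    cases hx : pvTok [] r with
    | nil => exact ⟨[], by rw [PySem.Chars.join_singleton]⟩
    | cons t ts =>
        exact ⟨' ' :: PySem.Chars.join [' '] (t :: ts),
          by rw [PySem.Chars.join_cons_cons]; simp⟩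

theorem pv_joinLast2 : ∀ (ts us : List (List Char)) (c : Char),
    (PySem.Chars.join [' '] us).getLast? = some c →
    (PySem.Chars.join [' '] (ts ++ us)).getLast? = some c := by
  intro ts
  induction ts with
  | nil => intro us c h; simpa using h
  | cons a ts ih =>
      intro us c h
      have hne : ts ++ us ≠ [] := by
        intro h0
        rcases List.append_eq_nil_iff.mp h0 with ⟨h1, h2⟩
        subst h2; simp [PySem.Chars.join, List.intercalate] at h
      obtain ⟨b, l, hbl⟩ := List.exists_cons_of_ne_nil hne
      rw [List.cons_append, hbl, PySem.Chars.join_cons_cons, ← hbl]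
      have h2 := ih us c h
      have hne2 : PySem.Chars.join [' '] (ts ++ us) ≠ [] := by
        intro h0; rw [h0] at h2; simp at h2
      rw [List.getLast?_append_of_ne_nil _ hne2]
      exact h2

-- the joined token list ends with the last character of the input
theorem pv_lastJoin : ∀ (suf buf : List Char) (c : Char), suf.getLast? = some c →
    (PySem.Chars.join [' '] (pvTok buf suf)).getLast? = some c := by
  intro suf
  induction suf with
  | nil => intro buf c h; simp at h
  | cons b l ih =>
      intro buf c h
      cases l with
      | nil =>
          simp at h; subst h
          by_cases hc : pvAl b
          · rw [pvTok_cons, if_pos hc]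
            simp [pvTok, PySem.Chars.join_singleton]
          · rw [pvTok_cons, if_neg hc]
            have : (if buf = [] then ([] : List (List Char)) else [buf]) ++ [b] :: pvTok [] []
                = (if buf = [] then ([] : List (List Char)) else [buf]) ++ [[b]] := by
              simp [pvTok]
            rw [this]
            exact pv_joinLast2 _ [[b]] b (by rw [PySem.Chars.join_singleton]; simp)
      | cons b' l' =>
          have hlast : (b :: b' :: l').getLast? = (b' :: l').getLast? := List.getLast?_cons_cons ..
          rw [hlast] at h
          by_cases hc : pvAl b
          · rw [pvTok_cons, if_pos hc]
            exact ih (buf ++ [b]) c h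
          · rw [pvTok_cons, if_neg hc]
            have h2 := ih [] c h
            exact pv_joinLast2 _ _ c (by
              rw [show [b] :: pvTok [] (b' :: l') = [[b]] ++ pvTok [] (b' :: l') from rfl]
              exact pv_joinLast2 [[b]] _ c h2)

theorem pv_dw_head {p : Char → Bool} : ∀ (l : List Char) (c : Char),
    (List.dropWhile p l).head? = some c → p c = false := by
  intro l
  induction l with
  | nil => intro c h; simp at h
  | cons a t ih =>
      intro c h
      by_cases ha : p a
      · rw [List.dropWhile_cons_of_pos ha] at h; exact ih c h
      · rw [List.dropWhile_cons_of_neg ha] at h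
        simp at h; rw [← h]; exact eq_false_of_ne_true ha

theorem pv_rstrip_prefix (y : List Char) : PySem.Chars.rstrip y <+: y := by
  have h := List.dropWhile_suffix (l := y.reverse) (p := PySem.Chars.isspace)
  have := List.reverse_prefix.mpr h
  simpa [PySem.Chars.rstrip] using this

theorem pv_prefix_head {l₁ l₂ : List Char} (h : l₁ <+: l₂) (c : Char)
    (hc : l₁.head? = some c) : l₂.head? = some c := by
  rcases h with ⟨t, rfl⟩
  cases l₁ with
  | nil => simp at hc
  | cons a t' => simpa using hc

-- whatever A returns never starts with whitespace …
theorem pv_headA (x : List Char) (d : Char)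
    (h : (PySem.Chars.rstrip (PySem.Chars.lstrip x)).head? = some d) :
    PySem.Chars.isspace d = false := by
  have h2 := pv_prefix_head (pv_rstrip_prefix _) d h
  exact pv_dw_head x d h2

-- … and never ends with whitespace
theorem pv_lastA (x : List Char) (d : Char)
    (h : (PySem.Chars.rstrip (PySem.Chars.lstrip x)).getLast? = some d) :
    PySem.Chars.isspace d = false := by
  rw [PySem.Chars.rstrip, List.getLast?_reverse] at h
  exact pv_dw_head _ d h

theorem pv_rstrip_last (x : List Char) (c : Char) (h : x.getLast? = some c)
    (hc : PySem.Chars.isspace c = false) : PySem.Chars.rstrip x = x := by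
  rw [PySem.Chars.rstrip]
  rw [← List.head?_reverse] at h
  cases hrev : x.reverse with
  | nil => simp [hrev] at h
  | cons a t =>
      rw [hrev] at h; simp at h
      rw [List.dropWhile_cons_of_neg (by rw [h]; simp [hc])]
      rw [← hrev, List.reverse_reverse]

theorem pv_rstrip_space (x : List Char) :
    PySem.Chars.rstrip (x ++ [' ']) = PySem.Chars.rstrip x := by
  rw [PySem.Chars.rstrip, PySem.Chars.rstrip, List.reverse_append]
  simp [show PySem.Chars.isspace ' ' = true from by decide]

theorem pv_lstrip_cons (c : Char) (t : List Char) (hc : PySem.Chars.isspace c = false) :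
    PySem.Chars.lstrip (c :: t) = c :: t := by
  rw [PySem.Chars.lstrip, List.dropWhile_cons_of_neg (by simp [hc])]

-- the two ports, re-expressed through pvEmitA / pvTok
theorem pvAeq (e : String) : organiza_expressao e
    = String.ofList (PySem.Chars.rstrip (PySem.Chars.lstrip
        (pvEmitA none (e.toList.filter (· ≠ ' '))))) := by
  simp only [organiza_expressao, pvRepl]
  have h := pvA1 (e.toList.filter (· ≠ ' ')) [] []
  simp only [List.length_nil, Nat.cast_zero, List.nil_append, List.getLast?_nil] at h
  rw [h]

theorem pvBeq (e : String) : organiza_expressao_alt e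
    = String.ofList (PySem.Chars.join [' '] (pvTok [] (e.toList.filter (· ≠ ' ')))) := by
  simp only [organiza_expressao_alt, pvRepl]
  have h := pvB1 (e.toList.filter (· ≠ ' ')) [] []
  simp only [List.nil_append] at h
  rw [h]

-- ===== VERDICT (by name: the statement is the Claim_ definition above) =====
theorem organiza_expressao_spec : Claim_unchanged_organiza_expressao := by
  intro e _ hnd
  rw [pvAeq, pvBeq]
  rcases hsplit : (e.toList.filter (· ≠ ' ')) with _ | ⟨c, r⟩
  · simp [pvEmitA, pvTok, PySem.Chars.lstrip, PySem.Chars.rstrip,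
      PySem.Chars.join, List.intercalate]
  · unfold D_organiza_expressao at hnd
    rw [hsplit] at hnd
    have hno : ¬ (PySem.Chars.isspace ((c :: r).headD ' ') = true
        ∨ PySem.Chars.isspace ((c :: r).getLastD ' ') = true) :=
      fun h => hnd ⟨by simp, h⟩
    rw [not_or] at hno
    obtain ⟨hhead0, hlastw⟩ := hno
    have hhead : PySem.Chars.isspace c = false := by simpa using hhead0
    have hlast? : (c :: r).getLast? = some ((c :: r).getLast (by simp)) :=
      List.getLast?_eq_some_getLast (by simp)
    set d := (c :: r).getLast (by simp) with hd
    have hlastw' : PySem.Chars.isspace d = false := by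
      rw [List.getLastD_eq_getLast?, hlast?] at hlastw
      simpa using hlastw
    have hL := (pvL (c :: r)).1 none (by intro q hq; cases hq)
    rw [hL]
    obtain ⟨tail, htail⟩ := pv_headJoin c r
    have hjoinlast := pv_lastJoin (c :: r) [] d hlast?
    by_cases hal : pvAl d
    · have htr : pvTrail (c :: r) = [] := by simp [pvTrail, hlast?, hal]
      rw [htr, List.append_nil, htail, pv_lstrip_cons c tail hhead, ← htail,
        pv_rstrip_last _ d hjoinlast hlastw']
    · have htr : pvTrail (c :: r) = [' '] := by simp [pvTrail, hlast?, hal]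
      rw [htr, htail, List.cons_append, pv_lstrip_cons c (tail ++ [' ']) hhead,
        ← List.cons_append, ← htail, pv_rstrip_space,
        pv_rstrip_last _ d hjoinlast hlastw']

theorem organiza_expressao_changed : Claim_changed_organiza_expressao := by
  unfold Claim_changed_organiza_expressao; decide

theorem organiza_expressao_tight : Claim_exact_organiza_expressao := by
  intro e _ hd heq
  have heq' := congrArg String.toList heq
  rw [pvAeq, pvBeq] at heq'
  simp only [String.toList_ofList] at heq'
  unfold D_organiza_expressao at hd
  obtain ⟨hne, hdisj⟩ := hd
  obtain ⟨c, r, hsplit⟩ := List.exists_cons_of_ne_nil hne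
  rw [hsplit] at heq' hdisj
  obtain ⟨tail, htail⟩ := pv_headJoin c r
  rcases hdisj with hws | hws
  · simp only [List.headD_cons] at hws
    have hhead : (PySem.Chars.join [' '] (pvTok [] (c :: r))).head? = some c := by
      rw [htail]; simp
    rw [← heq'] at hhead
    have := pv_headA _ c hhead
    rw [this] at hws; exact Bool.false_ne_true hws
  · have hlast? : (c :: r).getLast? = some ((c :: r).getLast (by simp)) :=
      List.getLast?_eq_some_getLast (by simp)
    set d := (c :: r).getLast (by simp) with hd
    rw [List.getLastD_eq_getLast?, hlast?] at hws
    simp only [Option.getD_some] at hws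
    have hlast : (PySem.Chars.join [' '] (pvTok [] (c :: r))).getLast? = some d :=
      pv_lastJoin (c :: r) [] d hlast?
    rw [← heq'] at hlast
    have := pv_lastA _ d hlast
    rw [this] at hws; exact Bool.false_ne_true hws
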